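-- pv_equiv track=rewrite | github.com/protocol66/REU | utils.py | splitBits
-- ===== SOURCE A (Python) =====
-- def splitBits(value, n):
--     ''' Split `value` into a list of `n`-bit integers '''
--     value = int(value)
--     original = value
--     mask = (1 << n) - 1
--     segments = []
--     if value == 0:
--         segments.append(0)
--     while value and (original.bit_length() / n) > len(segments):
--         segments.append(value & mask)
--         value >>= n
--     segments.reverse()
--     return segments
-- ===== SOURCE B (Python) =====
-- def splitBits(value, n):
--     ''' Split `value` into a list of `n`-bit integers '''
--     value = int(value)
--     mask = (1 << n) - 1
--     if value == 0:
--         return [0]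
--     count = -(-value.bit_length() // n)
--     return [(value >> (n * (count - 1 - i))) & mask for i in range(count)]
-- ===== Notes on version B (the rewrite author's own statement) =====
-- stated objective: alternative
-- what changed: B computes the segment count once by exact integer ceiling division of bit_length by n and emits the segments directly MSB-first via indexed shifts in a comprehension, replacing A's shift-and-accumulate while loop followed by reverse().
import Mathlib
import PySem

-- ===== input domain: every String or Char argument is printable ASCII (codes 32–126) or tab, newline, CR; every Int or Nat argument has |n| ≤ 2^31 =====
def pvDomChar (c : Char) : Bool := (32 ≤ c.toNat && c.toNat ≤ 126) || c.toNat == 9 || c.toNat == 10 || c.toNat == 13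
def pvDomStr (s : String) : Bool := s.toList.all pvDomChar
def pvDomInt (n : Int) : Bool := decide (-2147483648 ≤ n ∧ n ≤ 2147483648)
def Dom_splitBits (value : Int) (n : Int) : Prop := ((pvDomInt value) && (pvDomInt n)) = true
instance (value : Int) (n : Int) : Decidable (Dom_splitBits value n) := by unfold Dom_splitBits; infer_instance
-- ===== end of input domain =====

-- B replaces A's shift-accumulate-reverse loop by computing the segment count once
-- (ceil of bit_length / n, in exact integer arithmetic) and emitting the segments
-- directly MSB-first by indexed shifts (objective: alternative decomposition).

-- ===== PORT A =====
-- the while loop of A; fuel only guards totality (bitLength original + 1 always suffices on Pre_).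
-- Python's float comparison `original.bit_length() / n > len(segments)` is ported as the exact
-- integer comparison `len(segments) * n < bit_length` — on Dom (bit_length ≤ 32, 1 ≤ n ≤ 2^31)
-- the float division is far from any integer whenever the two sides differ, so they coincide.
def splitBitsLoopA (original n mask : Int) : Nat → Int → List Int → List Int
  | 0, _, segments => segments
  | fuel + 1, value, segments =>
    if value ≠ 0 ∧ (segments.length : Int) * n < (PySem.Int.bitLength original : Int) then
      splitBitsLoopA original n mask fuel (value >>> n.toNat)
        (segments ++ [PySem.Int.band value mask])
    else segments

def splitBits (value : Int) (n : Int) : List Int :=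
  -- value = int(value) is the identity on Int
  let original := value
  let mask := (1 : Int) <<< n.toNat - 1     -- (1 << n) - 1; n < 0 raises in Python (outside Pre_)
  let segments : List Int := if value = 0 then [0] else []
  (splitBitsLoopA original n mask (PySem.Int.bitLength original + 1) value segments).reverse

-- ===== PORT B =====
def splitBits_alt (value : Int) (n : Int) : List Int :=
  let mask := (1 : Int) <<< n.toNat - 1     -- (1 << n) - 1
  if value = 0 then [0]
  else
    -- count = -(-value.bit_length() // n)   (ceiling division, exact integers)
    let count := -(PySem.Int.floordiv (-(PySem.Int.bitLength value : Int)) n)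
    -- [(value >> (n*(count-1-i))) & mask for i in range(count)]
    (List.range count.toNat).map
      (fun (i : Nat) => PySem.Int.band (value >>> (n * (count - 1 - (i : Int))).toNat) mask)

-- ===== PRECONDITION & SPEC =====
-- Pre_ excludes exactly the inputs where Python A raises: n < 0 (ValueError from 1 << n),
-- and n = 0 with value ≠ 0 (ZeroDivisionError in the loop test). B raises there too.
def Pre_splitBits (value : Int) (n : Int) : Prop := 1 ≤ n ∨ (n = 0 ∧ value = 0)
instance (value : Int) (n : Int) : Decidable (Pre_splitBits value n) := by
  unfold Pre_splitBits; infer_instance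

def pvWitness_splitBits : Int × Int := (5, 2)

def Spec_splitBits (value : Int) (n : Int) (out : List Int) : Prop := out = splitBits_alt value n
instance (value : Int) (n : Int) (out : List Int) : Decidable (Spec_splitBits value n out) := by
  unfold Spec_splitBits; infer_instance

-- ===== CLAIM (what is proved, stated in full; the proofs are below) =====
def Claim_equal_splitBits : Prop := ∀ (value : Int) (n : Int), Dom_splitBits value n → Pre_splitBits value n → Spec_splitBits value n (splitBits value n)

-- ===== LEMMAS AND PROOFS =====

-- after k iterations A's running value is value >>> (n.toNat * k)
theorem shift_step (value : Int) (N k : Nat) :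
    value >>> (N * k) >>> N = value >>> (N * (k + 1)) := by
  simp only [Int.shiftRight_eq_div_pow]
  rw [Int.ediv_ediv_of_nonneg (by positivity), ← Nat.cast_mul, ← pow_add, Nat.mul_succ]

-- the running value stays nonzero strictly below the segment count
theorem shifted_ne_zero (value : Int) (N k : Nat) (hv : value ≠ 0)
    (hk : N * k ≤ PySem.Int.bitLength value - 1) :
    value >>> (N * k) ≠ 0 := by
  rw [Int.shiftRight_eq_div_pow]
  rcases lt_or_gt_of_ne hv with hneg | hpos
  · exact ne_of_lt (Int.ediv_neg_of_neg_of_pos hneg (by positivity))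
  · have h1 : (2 : Nat) ^ (N * k) ≤ 2 ^ (PySem.Int.bitLength value - 1) :=
      Nat.pow_le_pow_right (by norm_num) hk
    have h2 := PySem.Int.two_pow_bitLength_le value hv
    have h3 : ((2 : Nat) ^ (N * k) : Int) ≤ value := by
      have : value.natAbs = value.toNat := by omega
      calc ((2 : Nat) ^ (N * k) : Int) ≤ (value.natAbs : Int) := by exact_mod_cast le_trans h1 h2
        _ = value := by omega
    have : (1 : Int) ≤ value / ((2 : Nat) ^ (N * k) : Int) :=
      (Int.le_ediv_iff_mul_le (by positivity)).mpr (by simpa using h3)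
    push_cast at this ⊢
    omega

-- main loop характеристика: run from step k with c total segments
theorem loopA_spec (value n mask : Int) (c : Nat)
    (hub : (PySem.Int.bitLength value : Int) ≤ n * c)
    (hlow : ∀ j : Nat, j < c → (j : Int) * n < (PySem.Int.bitLength value : Int))
    (hnz : ∀ j : Nat, j < c → value >>> (n.toNat * j) ≠ 0) :
    ∀ (fuel k : Nat) (segs : List Int), segs.length = k → k ≤ c → c - k ≤ fuel →
      splitBitsLoopA value n mask fuel (value >>> (n.toNat * k)) segs
        = segs ++ (List.range (c - k)).map
            (fun t => PySem.Int.band (value >>> (n.toNat * (k + t))) mask) := by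
  intro fuel
  induction fuel with
  | zero =>
    intro k segs hlen hkc hfuel
    have : k = c := by omega
    simp [splitBitsLoopA, this]
  | succ f ih =>
    intro k segs hlen hkc hfuel
    by_cases hkceq : k = c
    · subst hkceq
      have hstop : ¬ ((segs.length : Int) * n < (PySem.Int.bitLength value : Int)) := by
        rw [hlen, not_lt, mul_comm]; exact hub
      simp [splitBitsLoopA, hstop]
    · have hklt : k < c := lt_of_le_of_ne hkc hkceq
      have hcond : value >>> (n.toNat * k) ≠ 0 ∧
          ((segs.length : Int) * n < (PySem.Int.bitLength value : Int)) := by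
        exact ⟨hnz k hklt, by rw [hlen]; exact hlow k hklt⟩
      rw [splitBitsLoopA, if_pos hcond, shift_step]
      rw [ih (k + 1) (segs ++ [PySem.Int.band (value >>> (n.toNat * k)) mask])
            (by simp [hlen]) hklt (by omega)]
      have hck : c - k = (c - (k + 1)) + 1 := by omega
      rw [hck, List.range_succ_eq_map, List.map_cons, List.map_map, List.append_assoc,
        List.singleton_append]
      have htail : List.map (fun t => PySem.Int.band (value >>> (n.toNat * (k + 1 + t))) mask)
            (List.range (c - (k + 1)))
          = List.map ((fun t => PySem.Int.band (value >>> (n.toNat * (k + t))) mask) ∘ Nat.succ)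
            (List.range (c - (k + 1))) := by
        apply List.map_congr_left
        intro a _
        have h3 : n.toNat * (k + 1 + a) = n.toNat * (k + (a + 1)) := by ring
        simp [Function.comp, Nat.succ_eq_add_one, h3]
      rw [htail]
      simp

theorem splitBits_spec_aux (value n : Int) (hpre : Pre_splitBits value n) :
    splitBits value n = splitBits_alt value n := by
  by_cases hv : value = 0
  · subst hv
    simp [splitBits, splitBits_alt, splitBitsLoopA, PySem.Int.bitLength]
  · have hn : 1 ≤ n := by
      rcases hpre with h | ⟨_, h0⟩
      · exact h
      · exact absurd h0 hv
    set bl : Nat := PySem.Int.bitLength value with hbl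
    set cI : Int := -(PySem.Int.floordiv (-(bl : Int)) n) with hcI
    -- characterize the ceiling division
    have hc := (PySem.Int.neg_floordiv_neg_eq_iff_of_pos (a := (bl : Int)) (b := n)
        (q := cI) (by omega)).mp rfl
    obtain ⟨hclow, hcub⟩ := hc
    have hbl1 : 1 ≤ bl := by
      by_contra h
      have hbl0 : bl = 0 := by omega
      have := PySem.Int.lt_two_pow_bitLength value
      rw [← hbl, hbl0] at this
      simp at this
      exact hv (by omega)
    have hbl1' : (1 : Int) ≤ (bl : Int) := by exact_mod_cast hbl1
    have hcpos : 1 ≤ cI := by nlinarith [hcub, hbl1', hn]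
    set c : Nat := cI.toNat with hc'
    have hcast : (c : Int) = cI := Int.toNat_of_nonneg (by omega)
    have hNn : ((n.toNat : Nat) : Int) = n := Int.toNat_of_nonneg (by omega)
    have hcbl : c ≤ bl := by
      have h1 : cI - 1 ≤ (cI - 1) * n := le_mul_of_one_le_right (by omega) hn
      have h2 : cI - 1 < (bl : Int) := lt_of_le_of_lt h1 hclow
      omega
    have hlow : ∀ j : Nat, j < c → (j : Int) * n < (bl : Int) := by
      intro j hj
      have hjle : (j : Int) ≤ cI - 1 := by omega
      have : (j : Int) * n ≤ (cI - 1) * n := by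
        apply mul_le_mul_of_nonneg_right hjle (by omega)
      omega
    have hnz : ∀ j : Nat, j < c → value >>> (n.toNat * j) ≠ 0 := by
      intro j hj
      apply shifted_ne_zero value n.toNat j hv
      have := hlow j hj
      have : (n.toNat : Int) * (j : Int) < (bl : Int) := by rw [hNn]; linarith [hlow j hj]
      have hlt : n.toNat * j < bl := by exact_mod_cast this
      omega
    have hub' : (bl : Int) ≤ n * (c : Int) := by rw [hcast, mul_comm]; exact hcub
    have hmain := loopA_spec value n ((1 : Int) <<< n.toNat - 1) c hub' hlow hnz
        (bl + 1) 0 [] rfl (by omega) (by omega)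
    simp only [Nat.mul_zero, Nat.zero_add, Int.shiftRight_zero, List.nil_append, Nat.sub_zero]
      at hmain
    -- A's result
    unfold splitBits splitBits_alt
    simp only [if_neg hv, ← hbl, ← hcI, ← hc']
    rw [hmain]
    -- reverse of the LSB-first list is B's MSB-first list
    apply List.ext_getElem
    · simp
    · intro i h1 h2
      simp only [List.getElem_reverse, List.length_map, List.length_range] at *
      rw [List.getElem_map, List.getElem_map, List.getElem_range, List.getElem_range]
      congr 2
      have hi : i < c := by simpa using h2
      have he1 : (n * (cI - 1 - (i : Int))).toNat = n.toNat * (c - 1 - i) := by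
        have h3 : ((c - 1 - i : Nat) : Int) = cI - 1 - (i : Int) := by omega
        have h2' : n * (cI - 1 - (i : Int)) = ((n.toNat * (c - 1 - i) : Nat) : Int) := by
          calc n * (cI - 1 - (i : Int)) = ((n.toNat : Nat) : Int) * ((c - 1 - i : Nat) : Int) := by
                rw [hNn, h3]
            _ = ((n.toNat * (c - 1 - i) : Nat) : Int) := by push_cast; ring
        rw [h2', Int.toNat_natCast]
      rw [he1]

-- ===== VERDICT (by name: the statement is the Claim_ definition above) =====
theorem splitBits_spec : Claim_equal_splitBits := by
  intro value n _ hpre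
  unfold Spec_splitBits
  exact splitBits_spec_aux value n hpre
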